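-- pv_equiv track=rewrite | github.com/Surya-132/amFOSS-Task | Task-4/Power_Combinations.py | power_sum
-- ===== SOURCE A (Python) =====
-- def power_sum(X,N,num=1):
--     value = X - num ** N
--     if value==0:
--         return 1
--     elif value<0:
--         return 0
--     else:
--         return power_sum(value,N,num+1)+power_sum(X,N,num+1)
-- ===== SOURCE B (Python) =====
-- def power_sum(X, N, num=1):
--     if X <= 0:
--         return 0
--     powers = []
--     k = num
--     while k ** N <= X:
--         powers.append(k ** N)
--         k += 1
--     ways = {0: 1}
--     for p in powers:
--         new = dict(ways)
--         for s, c in ways.items():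
--             t = s + p
--             if t <= X:
--                 new[t] = new.get(t, 0) + c
--         ways = new
--     return ways.get(X, 0)
-- ===== Notes on version B (the rewrite author's own statement) =====
-- stated objective: alternative
-- what changed: Replaced the exponential branch-on-each-power recursion by a bottom-up subset-sum DP (a dict counting the ways to reach each sum <= X) over the powers k^N <= X.
-- outside the precondition, e.g. on power_sum(-2, 1, -2): A returns 1, B returns 0; on power_sum(1, -1, 1): A returns 1, B does not finish within the time limit
import Mathlib
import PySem

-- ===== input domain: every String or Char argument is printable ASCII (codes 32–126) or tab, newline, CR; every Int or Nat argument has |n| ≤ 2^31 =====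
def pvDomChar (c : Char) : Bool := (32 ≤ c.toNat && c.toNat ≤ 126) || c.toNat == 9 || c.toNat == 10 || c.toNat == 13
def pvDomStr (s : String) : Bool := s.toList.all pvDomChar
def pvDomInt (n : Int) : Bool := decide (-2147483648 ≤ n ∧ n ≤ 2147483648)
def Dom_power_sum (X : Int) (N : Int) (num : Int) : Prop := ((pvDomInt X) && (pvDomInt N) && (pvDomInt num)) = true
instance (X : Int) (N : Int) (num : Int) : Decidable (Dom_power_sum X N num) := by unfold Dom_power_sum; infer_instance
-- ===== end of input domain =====

-- B replaces A's exponential include/exclude recursion by a bottom-up dict-based subset-sum DP over the powers k^N ≤ X (alternative algorithm, same return values on Pre_; no argument is mutated).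

-- ===== PORT A =====
-- A's recursion is not structurally decreasing, so it is run on a fuel that is
-- provably sufficient on Pre_ (fuel exhaustion is never reached there).
def pvAGo (N : Int) : Nat → Int → Int → Int
  | 0, _, _ => 0
  | fuel+1, X, num =>
    let value := X - num ^ N.toNat
    if value = 0 then 1
    else if value < 0 then 0
    else pvAGo N fuel value (num+1) + pvAGo N fuel X (num+1)

def power_sum (X : Int) (N : Int) (num : Int) : Int :=
  pvAGo N ((X - num).toNat + (1 - num).toNat * ((num.natAbs : Nat) ^ N.toNat + 1) + 1) X num

-- ===== PORT B =====
-- the 'while k ** N <= X' loop of Source B, with sufficient fuel (on Pre_ at most X - num + 1 iterations run)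
def pvBPows (N X : Int) : Nat → Int → List Int
  | 0, _ => []
  | fuel+1, k => if k ^ N.toNat ≤ X then k ^ N.toNat :: pvBPows N X fuel (k+1) else []

-- one pass of Source B's loop body: new = dict(ways); for s, c in ways.items(): if s+p <= X: new[s+p] = new.get(s+p,0) + c
def pvBStep (X : Int) (ways : PySem.Dict Int Int) (p : Int) : PySem.Dict Int Int :=
  ways.items.foldl
    (fun nw sc =>
      if sc.1 + p ≤ X then nw.insert (sc.1 + p) (nw.getD (sc.1 + p) 0 + sc.2) else nw)
    ways

def power_sum_alt (X : Int) (N : Int) (num : Int) : Int :=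
  if X ≤ 0 then 0
  else
    let powers := pvBPows N X ((X - num).toNat + 1) num
    let ways := powers.foldl (pvBStep X) (PySem.Dict.empty.insert 0 1)
    ways.getD X 0

-- ===== PRECONDITION & SPEC =====
-- Pre_ restricts to the function's natural domain (the public call is power_sum(X, N) with the
-- default num = 1, and the recursion keeps num ≥ 1): for N ≤ 0 A raises RecursionError on all but
-- trivial inputs (or returns via float arithmetic) and B's power enumeration does not terminate;
-- for num ≤ 0 A's early 'return 1' silently discards combinations of larger powers, an artefact
-- outside the intended domain that B does not reproduce.
def Pre_power_sum (X : Int) (N : Int) (num : Int) : Prop := 1 ≤ N ∧ 1 ≤ num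
instance (X : Int) (N : Int) (num : Int) : Decidable (Pre_power_sum X N num) := by
  unfold Pre_power_sum; infer_instance

def pvWitness_power_sum : Int × Int × Int := (10, 2, 1)

def Spec_power_sum (X : Int) (N : Int) (num : Int) (out : Int) : Prop := out = power_sum_alt X N num
instance (X : Int) (N : Int) (num : Int) (out : Int) : Decidable (Spec_power_sum X N num out) := by
  unfold Spec_power_sum; infer_instance

-- ===== CLAIM (what is proved, stated in full; the proofs are below) =====
def Claim_equal_power_sum : Prop := ∀ (X : Int) (N : Int) (num : Int), Dom_power_sum X N num → Pre_power_sum X N num → Spec_power_sum X N num (power_sum X N num)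

-- ===== LEMMAS AND PROOFS =====

-- number of sub(multi)sets of ps summing to v — the common mathematical bridge
def pvCnt : List Int → Int → Int
  | [], v => if v = 0 then 1 else 0
  | p :: ps, v => pvCnt ps v + pvCnt ps (v - p)

-- the consecutive powers (num+0)^N, …, (num+m-1)^N
def pvPows (N num : Int) (m : Nat) : List Int :=
  (List.range m).map (fun i : Nat => (num + (i : Int)) ^ N.toNat)

theorem pvCnt_neg (ps : List Int) (v : Int) (hps : ∀ p ∈ ps, 0 < p) (hv : v < 0) :
    pvCnt ps v = 0 := by
  induction ps generalizing v with
  | nil => simp [pvCnt]; omega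
  | cons p ps ih =>
      have hp := hps p (by simp)
      have h1 := ih v (fun q hq => hps q (by simp [hq])) hv
      have h2 := ih (v - p) (fun q hq => hps q (by simp [hq])) (by omega)
      simp [pvCnt, h1, h2]

theorem pvCnt_zero (ps : List Int) (hps : ∀ p ∈ ps, 0 < p) : pvCnt ps 0 = 1 := by
  induction ps with
  | nil => simp [pvCnt]
  | cons p ps ih =>
      have hp := hps p (by simp)
      have h1 := ih (fun q hq => hps q (by simp [hq]))
      have h2 := pvCnt_neg ps (-p) (fun q hq => hps q (by simp [hq])) (by omega)
      simp [pvCnt, h1, h2]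

theorem pvCnt_big (ps : List Int) (v : Int) (hps : ∀ p ∈ ps, 0 < p)
    (hbig : ∀ p ∈ ps, v < p) (hv : 1 ≤ v) : pvCnt ps v = 0 := by
  induction ps with
  | nil => simp [pvCnt]; omega
  | cons p ps ih =>
      have hp := hps p (by simp)
      have hb := hbig p (by simp)
      have h1 := ih (fun q hq => hps q (by simp [hq])) (fun q hq => hbig q (by simp [hq]))
      have h2 := pvCnt_neg ps (v - p) (fun q hq => hps q (by simp [hq])) (by omega)
      simp [pvCnt, h1, h2]

-- elements larger than the target (and positive weights) never contribute
theorem pvCnt_trim (ps qs : List Int) (v : Int) (hps : ∀ p ∈ ps, 0 < p)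
    (hqs : ∀ q ∈ qs, 0 < q ∧ v < q) : pvCnt (ps ++ qs) v = pvCnt ps v := by
  induction ps generalizing v with
  | nil =>
      simp only [List.nil_append, pvCnt]
      rcases lt_trichotomy v 0 with h | h | h
      · rw [pvCnt_neg qs v (fun q hq => (hqs q hq).1) h]; simp [show v ≠ 0 by omega]
      · subst h; rw [pvCnt_zero qs (fun q hq => (hqs q hq).1)]; simp
      · rw [pvCnt_big qs v (fun q hq => (hqs q hq).1) (fun q hq => (hqs q hq).2) (by omega)]
        simp [show v ≠ 0 by omega]
  | cons p ps ih =>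
      have hp := hps p (by simp)
      simp only [List.cons_append, pvCnt]
      rw [ih v (fun q hq => hps q (by simp [hq])) hqs,
          ih (v - p) (fun q hq => hps q (by simp [hq]))
            (fun q hq => ⟨(hqs q hq).1, by have := (hqs q hq).2; omega⟩)]

theorem pvCnt_perm {l l' : List Int} (h : l.Perm l') : ∀ v, pvCnt l v = pvCnt l' v := by
  induction h with
  | nil => intro v; rfl
  | cons x _ ih => intro v; simp [pvCnt, ih]
  | swap x y l =>
      intro v
      simp only [pvCnt]
      rw [show v - y - x = v - x - y by ring]
      ring
  | trans _ _ ih1 ih2 => intro v; rw [ih1, ih2]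

theorem pvCnt_reverse (l : List Int) (v : Int) : pvCnt l.reverse v = pvCnt l v :=
  pvCnt_perm (List.reverse_perm l) v

theorem pvPows_cons (N num : Int) (m : Nat) :
    pvPows N num (m+1) = num ^ N.toNat :: pvPows N (num+1) m := by
  unfold pvPows
  rw [List.range_succ_eq_map, List.map_cons, List.map_map]
  simp only [Nat.cast_zero, add_zero]
  congr 1
  apply List.map_congr_left
  intro i _
  simp only [Function.comp_apply, Nat.succ_eq_add_one]
  push_cast
  ring_nf

theorem pvPows_append (N num : Int) (j e : Nat) :
    pvPows N num (j + e) = pvPows N num j ++ pvPows N (num + j) e := by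
  unfold pvPows
  rw [List.range_add, List.map_append, List.map_map]
  congr 1
  apply List.map_congr_left
  intro i _
  simp only [Function.comp_apply]
  push_cast
  ring_nf

theorem pvPows_mem {N num : Int} {m : Nat} {p : Int} (hp : p ∈ pvPows N num m) :
    ∃ i : Nat, i < m ∧ p = (num + i) ^ N.toNat := by
  simp only [pvPows, List.mem_map, List.mem_range] at hp
  obtain ⟨i, hi, rfl⟩ := hp
  exact ⟨i, hi, rfl⟩

theorem pvPow_pos {k : Int} (hk : 1 ≤ k) (n : Nat) : 1 ≤ k ^ n := by
  calc (1:Int) = 1 ^ n := (one_pow n).symm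
  _ ≤ k ^ n := pow_le_pow_left₀ (by norm_num) hk n

theorem pvSelf_le_pow {k : Int} (hk : 1 ≤ k) {n : Nat} (hn : n ≠ 0) : k ≤ k ^ n :=
  le_self_pow₀ hk hn

theorem pvPows_pos {N num : Int} {m : Nat} (hnum : 1 ≤ num) :
    ∀ p ∈ pvPows N num m, 0 < p := by
  intro p hp
  obtain ⟨i, _, rfl⟩ := pvPows_mem hp
  have : (1:Int) ≤ num + i := by omega
  exact lt_of_lt_of_le (by norm_num) (pvPow_pos this _)

-- ===== A-side: the fuel recursion computes pvCnt of the consecutive powers =====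
theorem pvAGo_eq_cnt (N : Int) (hN : 1 ≤ N) :
    ∀ (fuel : Nat) (X num : Int) (m : Nat), 1 ≤ num → 1 ≤ X →
      X - num < (fuel : Int) → X < num + m →
      pvAGo N fuel X num = pvCnt (pvPows N num m) X := by
  have hn0 : N.toNat ≠ 0 := by omega
  intro fuel
  induction fuel with
  | zero =>
      intro X num m hnum hX hfuel hm
      -- here num > X, so every power exceeds X and both sides are 0
      have hbig : ∀ p ∈ pvPows N num m, X < p := by
        intro p hp
        obtain ⟨i, _, rfl⟩ := pvPows_mem hp
        have h1 : (num : Int) + i ≤ (num + i) ^ N.toNat := pvSelf_le_pow (by omega) hn0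
        omega
      rw [pvCnt_big _ _ (pvPows_pos hnum) hbig hX]
      rfl
  | succ fuel ih =>
      intro X num m hnum hX hfuel hm
      have hself : num ≤ num ^ N.toNat := pvSelf_le_pow hnum hn0
      show (let value := X - num ^ N.toNat
            if value = 0 then 1
            else if value < 0 then 0
            else pvAGo N fuel value (num+1) + pvAGo N fuel X (num+1)) = _
      simp only
      have hrest_big : ∀ {m' : Nat} (p : Int), p ∈ pvPows N (num+1) m' → num ^ N.toNat < p := by
        intro m' p hp
        obtain ⟨i, _, rfl⟩ := pvPows_mem hp
        exact pow_lt_pow_left₀ (by omega) (by omega) hn0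
      by_cases h0 : X - num ^ N.toNat = 0
      · -- X = num^N: the only combination is {num^N}
        have hm1 : 1 ≤ m := by omega
        obtain ⟨m', rfl⟩ : ∃ m', m = m' + 1 := ⟨m - 1, by omega⟩
        rw [if_pos h0, pvPows_cons]
        have e1 : pvCnt (pvPows N (num+1) m') X = 0 :=
          pvCnt_big _ X (pvPows_pos (by omega)) (fun p hp => by have := hrest_big p hp; omega) hX
        have e2 : pvCnt (pvPows N (num+1) m') (X - num ^ N.toNat) = 1 := by
          rw [h0]; exact pvCnt_zero _ (pvPows_pos (by omega))
        simp [pvCnt, e1, e2]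
      · rw [if_neg h0]
        by_cases hneg : X - num ^ N.toNat < 0
        · rw [if_pos hneg]
          -- every available power already exceeds X
          have hbig : ∀ p ∈ pvPows N num m, X < p := by
            intro p hp
            obtain ⟨i, _, rfl⟩ := pvPows_mem hp
            have : num ^ N.toNat ≤ (num + i) ^ N.toNat :=
              pow_le_pow_left₀ (by omega) (by omega) N.toNat
            omega
          rw [pvCnt_big _ _ (pvPows_pos hnum) hbig hX]
        · rw [if_neg hneg]
          have hv : 1 ≤ X - num ^ N.toNat := by omega
          have hm1 : 1 ≤ m := by omega
          obtain ⟨m', rfl⟩ : ∃ m', m = m' + 1 := ⟨m - 1, by omega⟩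
          rw [pvPows_cons]
          show _ = pvCnt _ X + pvCnt _ (X - num ^ N.toNat)
          rw [ih (X - num ^ N.toNat) (num+1) m' (by omega) hv (by omega) (by push_cast; omega),
              ih X (num+1) m' (by omega) hX (by omega) (by push_cast; omega)]
          ring

-- ===== B-side lemmas =====
theorem pvBPows_eq (N X : Int) (hN : 1 ≤ N) :
    ∀ (fuel : Nat) (k : Int), 1 ≤ k → X - k < (fuel : Int) →
      ∃ j : Nat, pvBPows N X fuel k = pvPows N k j ∧ X < (k + j) ^ N.toNat := by
  have hn0 : N.toNat ≠ 0 := by omega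
  intro fuel
  induction fuel with
  | zero =>
      intro k hk hfuel
      refine ⟨0, rfl, ?_⟩
      have : k ≤ k ^ N.toNat := pvSelf_le_pow hk hn0
      simp only [Int.ofNat_zero, add_zero]
      omega
  | succ fuel ih =>
      intro k hk hfuel
      by_cases h : k ^ N.toNat ≤ X
      · have hkX : k ≤ X := le_trans (pvSelf_le_pow hk hn0) h
        obtain ⟨j, hj, hbound⟩ := ih (k+1) (by omega) (by omega)
        refine ⟨j + 1, ?_, ?_⟩
        · show (if k ^ N.toNat ≤ X then k ^ N.toNat :: pvBPows N X fuel (k+1) else []) = _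
          rw [if_pos h, hj, pvPows_cons]
        · have : (k + 1 + (j:Int)) = (k + ((j:Int)+1)) := by ring
          rw [this] at hbound
          push_cast
          exact hbound
      · refine ⟨0, ?_, ?_⟩
        · show (if k ^ N.toNat ≤ X then k ^ N.toNat :: pvBPows N X fuel (k+1) else []) = _
          rw [if_neg h]; rfl
        · simp only [Int.ofNat_zero, add_zero]; omega

-- sum of the values attached to key a in an association list with distinct keys = dict lookup
theorem pvFilterKey (a : Int) :
    ∀ (l : List (Int × Int)), ((l.map Prod.fst).Nodup) → ∀ c : Int, (a, c) ∈ l →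
      l.filter (fun sc => sc.1 == a) = [(a, c)] := by
  intro l
  induction l with
  | nil => intro _ c hc; simp at hc
  | cons hd tl ih =>
      intro hnd c hc
      simp only [List.map_cons, List.nodup_cons] at hnd
      rcases List.mem_cons.mp hc with h | h
      · subst h
        simp only [List.filter_cons, BEq.rfl, if_pos]
        have : tl.filter (fun sc => sc.1 == a) = [] := by
          rw [List.filter_eq_nil_iff]
          intro sc hsc
          simp only [beq_iff_eq]
          intro hk
          have hmem : sc.1 ∈ tl.map Prod.fst := List.mem_map_of_mem hsc
          rw [hk] at hmem
          exact hnd.1 hmem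
        simp [this]
      · have hne : hd.1 ≠ a := by
          intro hk
          have hmem : ((a, c) : Int × Int).1 ∈ tl.map Prod.fst :=
            List.mem_map_of_mem (f := Prod.fst) h
          simp only at hmem
          apply hnd.1
          rw [hk]
          exact hmem
        rw [List.filter_cons_of_neg (by simp [hne])]
        exact ih hnd.2 c h

theorem pvDictFilterSum (d : PySem.Dict Int Int) (a : Int) (hnd : d.keys.Nodup) :
    ((d.items.filter (fun sc => sc.1 == a)).map Prod.snd).sum = d.getD a 0 := by
  cases h : d.get? a with
  | none =>
      have hna : a ∉ d.keys := (PySem.Dict.get?_eq_none_iff_not_mem_keys d a).mp h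
      have : d.items.filter (fun sc => sc.1 == a) = [] := by
        rw [List.filter_eq_nil_iff]
        intro sc hsc
        simp only [beq_iff_eq]
        intro hk
        exact hna (by rw [← hk]; exact PySem.Dict.mem_keys_of_mem_items d hsc)
      rw [this, PySem.Dict.getD_of_get?_eq_none d 0 h]
      rfl
  | some c =>
      have hmem : (a, c) ∈ d.items := PySem.Dict.mem_items_of_get?_eq_some d h
      have hnd' : (d.items.map Prod.fst).Nodup := by
        have : d.keys = d.items.map Prod.fst := by simp [PySem.Dict.keys]
        rwa [this] at hnd
      rw [pvFilterKey a d.items hnd' c hmem, PySem.Dict.getD_of_get?_eq_some d 0 h]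
      simp

-- the inner 'for s, c in ways.items()' loop, over any item list and start dict
theorem pvStepFold (X p : Int) :
    ∀ (l : List (Int × Int)) (nw : PySem.Dict Int Int) (v : Int),
      (l.foldl
        (fun nw sc =>
          if sc.1 + p ≤ X then nw.insert (sc.1 + p) (nw.getD (sc.1 + p) 0 + sc.2) else nw)
        nw).getD v 0
      = nw.getD v 0 + ((l.filter (fun sc => sc.1 + p == v && decide (v ≤ X))).map Prod.snd).sum := by
  intro l
  induction l with
  | nil => intro nw v; simp
  | cons sc l ih =>
      intro nw v
      rw [List.foldl_cons, ih]
      by_cases hle : sc.1 + p ≤ X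
      · rw [if_pos hle, PySem.Dict.getD_insert]
        by_cases hv : v = sc.1 + p
        · subst hv
          rw [if_pos rfl, List.filter_cons_of_pos (by simp [hle])]
          simp only [List.map_cons, List.sum_cons]
          ring
        · rw [if_neg hv, List.filter_cons_of_neg (by simp; intro h; omega)]
      · rw [if_neg hle]
        rw [List.filter_cons_of_neg (by simp; intro h; omega)]

theorem pvStep_getD (X p : Int) (ways : PySem.Dict Int Int) (hnd : ways.keys.Nodup) (v : Int) :
    (pvBStep X ways p).getD v 0
      = ways.getD v 0 + (if v ≤ X then ways.getD (v - p) 0 else 0) := by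
  unfold pvBStep
  rw [pvStepFold]
  congr 1
  by_cases hv : v ≤ X
  · rw [if_pos hv]
    rw [List.filter_congr (q := fun sc => sc.1 == v - p)
        (by intro sc _; simp [hv]; constructor <;> (intro h; omega))]
    exact pvDictFilterSum ways (v - p) hnd
  · rw [if_neg hv]
    rw [List.filter_congr (q := fun _ => false) (by intro sc _; simp [hv]),
        List.filter_false]
    rfl

theorem pvStep_nodup (X p : Int) (ways : PySem.Dict Int Int) (hnd : ways.keys.Nodup) :
    (pvBStep X ways p).keys.Nodup := by
  unfold pvBStep
  generalize ways.items = l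
  induction l generalizing ways with
  | nil => exact hnd
  | cons sc l ih =>
      rw [List.foldl_cons]
      by_cases hle : sc.1 + p ≤ X
      · rw [if_pos hle]
        exact ih _ (PySem.Dict.nodup_keys_insert _ _ _ hnd)
      · rw [if_neg hle]
        exact ih _ hnd

theorem pvFoldl_ways (X : Int) (hX : 1 ≤ X) :
    ∀ (l : List Int) (ways : PySem.Dict Int Int) (rs : List Int),
      (∀ p ∈ l, 0 < p) → (∀ p ∈ rs, 0 < p) → ways.keys.Nodup →
      (∀ v : Int, ways.getD v 0 = if 0 ≤ v ∧ v ≤ X then pvCnt rs v else 0) →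
      ∀ v : Int,
        (l.foldl (pvBStep X) ways).getD v 0
          = if 0 ≤ v ∧ v ≤ X then pvCnt (l.reverse ++ rs) v else 0 := by
  intro l
  induction l with
  | nil => intro ways rs _ _ _ hw v; simpa using hw v
  | cons p l ih =>
      intro ways rs hl hrs hnd hw v
      have hp : 0 < p := hl p (by simp)
      have hstep : ∀ y : Int, (pvBStep X ways p).getD y 0
          = if 0 ≤ y ∧ y ≤ X then pvCnt (p :: rs) y else 0 := by
        intro y
        rw [pvStep_getD X p ways hnd y, hw y, hw (y - p)]
        by_cases hy0 : 0 ≤ y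
        · by_cases hyX : y ≤ X
          · rw [if_pos (show 0 ≤ y ∧ y ≤ X from ⟨hy0, hyX⟩),
                if_pos (show 0 ≤ y ∧ y ≤ X from ⟨hy0, hyX⟩), if_pos hyX]
            by_cases hyp : 0 ≤ y - p
            · rw [if_pos (show 0 ≤ y - p ∧ y - p ≤ X from ⟨hyp, by omega⟩)]
              simp [pvCnt]
            · rw [if_neg (show ¬(0 ≤ y - p ∧ y - p ≤ X) by omega)]
              have hz : pvCnt rs (y - p) = 0 := pvCnt_neg rs (y - p) hrs (by omega)
              simp [pvCnt, hz]
          · rw [if_neg (show ¬(0 ≤ y ∧ y ≤ X) by omega),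
                if_neg (show ¬(0 ≤ y ∧ y ≤ X) by omega), if_neg hyX]
            simp
        · rw [if_neg (show ¬(0 ≤ y ∧ y ≤ X) by omega),
              if_neg (show ¬(0 ≤ y ∧ y ≤ X) by omega), if_pos (show y ≤ X by omega),
              if_neg (show ¬(0 ≤ y - p ∧ y - p ≤ X) by omega)]
          simp
      have := ih (pvBStep X ways p) (p :: rs) (fun q hq => hl q (by simp [hq]))
        (fun q hq => by
          rcases List.mem_cons.mp hq with h | h
          · omega
          · exact hrs q h)
        (pvStep_nodup X p ways hnd) hstep v
      simpa [List.foldl_cons, List.append_assoc] using this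

-- ===== final assembly =====
theorem pvMain (X N num : Int) (hN : 1 ≤ N) (hnum : 1 ≤ num) :
    power_sum X N num = power_sum_alt X N num := by
  have hn0 : N.toNat ≠ 0 := by omega
  unfold power_sum power_sum_alt
  rw [show (1 - num).toNat = 0 by omega, Nat.zero_mul, Nat.add_zero]
  by_cases hX : X ≤ 0
  · rw [if_pos hX]
    have hpow : 1 ≤ num ^ N.toNat := pvPow_pos hnum _
    show (let value := X - num ^ N.toNat
          if value = 0 then 1
          else if value < 0 then 0
          else _) = 0
    simp only
    rw [if_neg (by omega), if_pos (by omega)]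
  · rw [if_neg hX]
    have hX1 : 1 ≤ X := by omega
    simp only
    obtain ⟨j, hj, hbound⟩ :=
      pvBPows_eq N X hN ((X - num).toNat + 1) num hnum (by omega)
    rw [hj]
    -- B side: the DP computes pvCnt of the generated power list
    have hpos : ∀ p ∈ pvPows N num j, 0 < p := pvPows_pos hnum
    have hB : ((pvPows N num j).foldl (pvBStep X) (PySem.Dict.empty.insert 0 1)).getD X 0
        = pvCnt (pvPows N num j) X := by
      rw [pvFoldl_ways X hX1 (pvPows N num j) _ [] hpos (by simp)
          (PySem.Dict.nodup_keys_insert _ _ _ PySem.Dict.nodup_keys_empty)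
          (by
            intro v
            rw [PySem.Dict.getD_insert, PySem.Dict.getD_empty]
            by_cases hv : v = 0
            · subst hv
              simp [pvCnt, show (0:Int) ≤ X by omega]
            · simp [pvCnt, hv]) X]
      rw [if_pos ⟨by omega, le_refl X⟩, List.append_nil, pvCnt_reverse]
    rw [hB]
    -- A side: the recursion computes pvCnt of a long-enough power list
    set e : Nat := (X + 1 - (num + j)).toNat with he
    have hm : X < num + (j + e : Nat) := by
      push_cast
      omega
    rw [pvAGo_eq_cnt N hN ((X - num).toNat + 1) X num (j + e) hnum hX1 (by omega) hm]
    rw [pvPows_append]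
    rw [pvCnt_trim _ _ _ hpos]
    intro q hq
    obtain ⟨i, _, rfl⟩ := pvPows_mem hq
    have h1 : (num + j) ^ N.toNat ≤ (num + j + i) ^ N.toNat :=
      pow_le_pow_left₀ (by omega) (by omega) N.toNat
    have h2 : (1:Int) ≤ (num + j + i) ^ N.toNat := pvPow_pos (by omega) _
    constructor
    · omega
    · push_cast at hbound ⊢
      omega

-- ===== VERDICT (by name: the statement is the Claim_ definition above) =====
theorem power_sum_spec : Claim_equal_power_sum := by
  intro X N num _ hPre
  unfold Spec_power_sum
  exact pvMain X N num hPre.1 hPre.2
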